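-- pv_equiv track=rewrite | github.com/nandinicm/IDP | att/combine_JSON.py | get_row_blocks
-- ===== SOURCE A (Python) =====
-- def get_row_blocks(hist_list, page_start, page_end):
--     """
--     Using histogram data creates rows with page_start and page_end as left and right coordinates
--
--     :param hist_list: ndarray of count of black pixels
--     :param page_start: starting point to start checking rows
--     :param page_end: end point to finish checking rows
--     :return: list of all rows formed in that segment
--     """
--     para_block_list = []
--     data_start_flag = False
--     data_end_flag = True
--     for enum, val in enumerate(hist_list):
--         if val != max(hist_list) and not data_start_flag:
--             data_start_flag = True
--             data_end_flag = False
--             coor = [enum, page_start, 0, page_end]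
--         if val == max(hist_list) and data_start_flag:
--             data_start_flag = False
--             data_end_flag = True
--             coor[2] = enum
--
--             para_block_list.append(coor)
--     if not data_end_flag:
--         coor[2] = enum
--         para_block_list.append(coor)
--     return para_block_list
-- ===== SOURCE B (Python) =====
-- def get_row_blocks(hist_list, page_start, page_end):
--     """Run-table version: find maximal runs of below-max values, then map each
--     run (s, e) to its block in a separate pass."""
--     if not hist_list:
--         return []
--     maxv = max(hist_list)
--     n = len(hist_list)
--     runs = []
--     i = 0
--     while i < n:
--         if hist_list[i] != maxv:
--             j = i
--             while j + 1 < n and hist_list[j + 1] != maxv: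
--                 j += 1
--             runs.append((i, j))
--             i = j + 1
--         else:
--             i += 1
--     return [[s, page_start, e + 1 if e + 1 < n else e, page_end]
--             for (s, e) in runs]
-- ===== Notes on version B (the rewrite author's own statement) =====
-- stated objective: simpler
-- what changed: Replaced A's single stateful scan with start/end flags and an in-place-mutated coor list (plus max() recomputed every iteration) by a two-pass decomposition: compute max once, collect the maximal below-max runs as (start,end) pairs, then map each run to its block in a separate pass.
import Mathlib
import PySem

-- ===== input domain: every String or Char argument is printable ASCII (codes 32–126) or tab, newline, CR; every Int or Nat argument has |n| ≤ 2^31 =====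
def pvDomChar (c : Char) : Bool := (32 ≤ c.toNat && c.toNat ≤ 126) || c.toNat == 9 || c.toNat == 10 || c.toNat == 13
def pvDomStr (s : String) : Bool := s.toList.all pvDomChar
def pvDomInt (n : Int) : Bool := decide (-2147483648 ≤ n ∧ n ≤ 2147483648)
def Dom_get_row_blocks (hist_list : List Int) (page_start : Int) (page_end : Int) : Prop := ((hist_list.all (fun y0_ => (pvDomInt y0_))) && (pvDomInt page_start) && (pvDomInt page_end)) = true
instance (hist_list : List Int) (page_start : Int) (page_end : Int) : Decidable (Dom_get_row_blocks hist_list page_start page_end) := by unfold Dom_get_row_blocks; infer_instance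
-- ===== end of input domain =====

-- B replaces A's stateful flag-driven scan by a two-pass decomposition (collect the
-- below-max runs first, then map each run to its block); objective: simpler, same cost.

-- ===== PORT A =====
-- max(hist_list): Python raises on [] but the call is only reached inside the for-loop,
-- i.e. when the list is nonempty, so the .getD 0 default is never observed.
def pvMaxOf (hist : List Int) : Int := (PySem.List.max? hist (fun x => x)).getD 0

-- the for-loop of A: state = (para_block_list, data_start_flag, data_end_flag, coor),
-- enum the running index; on [] the trailing `if not data_end_flag` closes an open run
-- with coor[2] = enum (the last index, here enum - 1).
def grbA_loop (l : List Int) (hist : List Int) (ps pe : Int)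
    (acc : List (List Int)) (ds de : Bool) (coor : List Int) (enum : Int) :
    List (List Int) :=
  match l with
  | [] => if de = false then acc ++ [coor.set 2 (enum - 1)] else acc
  | v :: rest =>
    let mx := pvMaxOf hist
    let s1 : Bool × Bool × List Int :=
      if v ≠ mx ∧ ds = false then (true, false, [enum, ps, 0, pe]) else (ds, de, coor)
    if v = mx ∧ s1.1 = true then
      grbA_loop rest hist ps pe (acc ++ [s1.2.2.set 2 enum]) false true
        (s1.2.2.set 2 enum) (enum + 1)
    else
      grbA_loop rest hist ps pe acc s1.1 s1.2.1 s1.2.2 (enum + 1)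

def get_row_blocks (hist_list : List Int) (page_start : Int) (page_end : Int) : List (List Int) :=
  grbA_loop hist_list hist_list page_start page_end [] false true [] 0

-- ===== PORT B =====
-- inner while loop of B: from last confirmed index j, extend the run while the next
-- value is below max; returns (last index of the run, remaining suffix after it).
def grbB_inner (l : List Int) (mx : Int) (j : Int) : Int × List Int :=
  match l with
  | [] => (j, [])
  | x :: xs => if x ≠ mx then grbB_inner xs mx (j + 1) else (j, x :: xs)

-- needed by grbB_runs's decreasing_by
theorem grbB_inner_len_le (l : List Int) (mx : Int) (j : Int) :
    (grbB_inner l mx j).2.length ≤ l.length := by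
  induction l generalizing j with
  | nil => simp [grbB_inner]
  | cons x xs ih =>
    by_cases h : x ≠ mx
    · simp only [grbB_inner, if_pos h]
      exact Nat.le_succ_of_le (ih (j + 1))
    · simp [grbB_inner, h]

-- outer while loop of B: collect the maximal below-max runs as (start, end) pairs
def grbB_runs (l : List Int) (mx : Int) (i : Int) : List (Int × Int) :=
  match l with
  | [] => []
  | x :: xs =>
    if x ≠ mx then
      (i, (grbB_inner xs mx i).1) ::
        grbB_runs (grbB_inner xs mx i).2 mx ((grbB_inner xs mx i).1 + 1)
    else
      grbB_runs xs mx (i + 1)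
termination_by l.length
decreasing_by
  · exact Nat.lt_succ_of_le (grbB_inner_len_le ..)
  · simp

def get_row_blocks_alt (hist_list : List Int) (page_start : Int) (page_end : Int) : List (List Int) :=
  match hist_list with
  | [] => []
  | _ :: _ =>
    let mx := (PySem.List.max? hist_list (fun x => x)).getD 0
    let n : Int := hist_list.length
    (grbB_runs hist_list mx 0).map
      (fun p => [p.1, page_start, if p.2 + 1 < n then p.2 + 1 else p.2, page_end])

-- ===== PRECONDITION & SPEC =====
def Spec_get_row_blocks (hist_list : List Int) (page_start : Int) (page_end : Int) (out : List (List Int)) : Prop := out = get_row_blocks_alt hist_list page_start page_end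
instance (hist_list : List Int) (page_start : Int) (page_end : Int) (out : List (List Int)) : Decidable (Spec_get_row_blocks hist_list page_start page_end out) := by unfold Spec_get_row_blocks; infer_instance

-- ===== CLAIM (what is proved, stated in full; the proofs are below) =====
def Claim_equal_get_row_blocks : Prop := ∀ (hist_list : List Int) (page_start : Int) (page_end : Int), Dom_get_row_blocks hist_list page_start page_end → Spec_get_row_blocks hist_list page_start page_end (get_row_blocks hist_list page_start page_end)

-- ===== LEMMAS AND PROOFS =====

-- grbB_inner bookkeeping: final index + remaining length = start index + input length
theorem grbB_inner_pos (l : List Int) (mx : Int) (j : Int) :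
    (grbB_inner l mx j).1 + ((grbB_inner l mx j).2.length : Int) = j + l.length := by
  induction l generalizing j with
  | nil => simp [grbB_inner]
  | cons x xs ih =>
    by_cases h : x ≠ mx
    · simp only [grbB_inner, if_pos h, List.length_cons]
      have := ih (j + 1)
      push_cast at this ⊢
      omega
    · simp only [grbB_inner, if_neg h]

-- if grbB_inner leaves a nonempty suffix, its head is the max value
theorem grbB_inner_head (l : List Int) (mx : Int) (j : Int) (x : Int) (xs : List Int)
    (h : (grbB_inner l mx j).2 = x :: xs) : x = mx := by
  induction l generalizing j with
  | nil => simp [grbB_inner] at h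
  | cons y ys ih =>
    by_cases hy : y ≠ mx
    · simp only [grbB_inner, if_pos hy] at h
      exact ih (j + 1) h
    · simp only [grbB_inner, if_neg hy] at h
      cases h
      omega

-- what A's loop does after the inner scan settles: either the run reached the end of
-- the list (close it at j = the last index) or it closes at j + 1 and continues
def grbA_close (t : List Int) (j : Int) (hist : List Int) (ps pe : Int)
    (acc : List (List Int)) (s : Int) : List (List Int) :=
  match t with
  | [] => acc ++ [[s, ps, j, pe]]
  | _ :: rest' =>
    grbA_loop rest' hist ps pe (acc ++ [[s, ps, j + 1, pe]]) false true
      [s, ps, j + 1, pe] (j + 2)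

-- A's loop in the "run open" state (ds = true, coor = [s, ps, c, pe], current index i)
-- behaves like grbB_inner from j = i - 1 followed by grbA_close
theorem grbA_started (l : List Int) (hist : List Int) (ps pe : Int)
    (acc : List (List Int)) (s c i : Int) :
    grbA_loop l hist ps pe acc true false [s, ps, c, pe] i =
      grbA_close (grbB_inner l (pvMaxOf hist) (i - 1)).2
        (grbB_inner l (pvMaxOf hist) (i - 1)).1 hist ps pe acc s := by
  induction l generalizing acc c i with
  | nil =>
    simp [grbA_loop, grbB_inner, grbA_close, List.set]
  | cons v rest ih =>
    by_cases hv : v = pvMaxOf hist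
    · have h1 : (grbB_inner (v :: rest) (pvMaxOf hist) (i - 1)) = (i - 1, v :: rest) := by
        simp [grbB_inner, hv]
      simp only [grbA_loop, h1, grbA_close]
      simp [hv, List.set, show i - 1 + 1 = i by omega, show i - 1 + 2 = i + 1 by omega]
    · have h1 : (grbB_inner (v :: rest) (pvMaxOf hist) (i - 1)) =
          grbB_inner rest (pvMaxOf hist) i := by
        simp only [grbB_inner, if_pos hv]
        congr 1
        omega
      simp only [grbA_loop, h1]
      have h2 : ¬ (v = pvMaxOf hist ∧
          (if v ≠ pvMaxOf hist ∧ (true : Bool) = false then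
            ((true : Bool), (false : Bool), ([i, ps, 0, pe] : List Int))
           else (true, false, [s, ps, c, pe])).1 = true) := by
        simp [hv]
      rw [if_neg h2]
      simp only [if_neg (show ¬ (v ≠ pvMaxOf hist ∧ (true:Bool) = false) by simp)]
      have := ih acc c (i + 1)
      simpa [show i + 1 - 1 = i from by omega] using this

-- A's loop in the "no run open" state equals B's run table rendered through the map,
-- provided l is the suffix of hist at index i (i + |l| = |hist|)
theorem grbA_notstarted (fuel : ℕ) (l : List Int) (hist : List Int) (ps pe : Int)
    (acc : List (List Int)) (coor : List Int) (i : Int)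
    (hf : l.length ≤ fuel) (hn : i + (l.length : Int) = (hist.length : Int)) :
    grbA_loop l hist ps pe acc false true coor i =
      acc ++ (grbB_runs l (pvMaxOf hist) i).map
        (fun p => [p.1, ps, if p.2 + 1 < (hist.length : Int) then p.2 + 1 else p.2, pe]) := by
  induction fuel generalizing l acc coor i with
  | zero =>
    have : l = [] := List.length_eq_zero_iff.mp (Nat.le_zero.mp hf)
    subst this
    simp [grbA_loop, grbB_runs]
  | succ fuel ih =>
    cases l with
    | nil => simp [grbA_loop, grbB_runs]
    | cons v rest =>
      by_cases hv : v = pvMaxOf hist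
      · -- max value: nothing opens
        have hA : grbA_loop (v :: rest) hist ps pe acc false true coor i =
            grbA_loop rest hist ps pe acc false true coor (i + 1) := by
          simp [grbA_loop, hv]
        rw [hA, ih rest acc coor (i + 1) (by simpa using Nat.le_of_succ_le_succ (by simpa using hf))
            (by simp only [List.length_cons] at hn; push_cast at hn ⊢; omega)]
        simp only [grbB_runs, if_neg (show ¬ v ≠ pvMaxOf hist by simp [hv])]
      · -- below max: a run opens at i
        have hA : grbA_loop (v :: rest) hist ps pe acc false true coor i =
            grbA_loop rest hist ps pe acc true false [i, ps, 0, pe] (i + 1) := by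
          simp [grbA_loop, hv]
        rw [hA, grbA_started]
        have hpos := grbB_inner_pos rest (pvMaxOf hist) i
        have hlen : i + 1 + (rest.length : Int) = (hist.length : Int) := by
          simp only [List.length_cons] at hn; push_cast at hn ⊢; omega
        rw [show i + 1 - 1 = i by omega]
        simp only [grbB_runs, if_pos hv, List.map_cons]
        cases hrest : (grbB_inner rest (pvMaxOf hist) i).2 with
        | nil =>
          rw [hrest] at hpos
          simp only [List.length_nil] at hpos
          have hlast : ¬ ((grbB_inner rest (pvMaxOf hist) i).1 + 1 < (hist.length : Int)) := by
            push_cast at hpos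
            omega
          simp only [grbA_close, grbB_runs, List.map_nil]
          rw [if_neg hlast]
        | cons r rest' =>
          have hr : r = pvMaxOf hist := grbB_inner_head rest (pvMaxOf hist) i r rest' hrest
          rw [hrest] at hpos
          simp only [List.length_cons] at hpos
          push_cast at hpos
          have hjlt : (grbB_inner rest (pvMaxOf hist) i).1 + 1 < (hist.length : Int) := by
            omega
          have hflen : rest'.length ≤ fuel := by
            have h1 := grbB_inner_len_le rest (pvMaxOf hist) i
            rw [hrest] at h1
            simp only [List.length_cons] at h1
            have h2 : (v :: rest).length ≤ fuel + 1 := hf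
            simp only [List.length_cons] at h2
            omega
          simp only [grbA_close]
          rw [ih rest' _ _ ((grbB_inner rest (pvMaxOf hist) i).1 + 2) hflen (by omega)]
          simp only [grbB_runs, if_neg (show ¬r ≠ pvMaxOf hist by simp [hr])]
          rw [if_pos hjlt]
          rw [show (grbB_inner rest (pvMaxOf hist) i).1 + 1 + 1 = (grbB_inner rest (pvMaxOf hist) i).1 + 2 by omega]
          simp

-- ===== VERDICT (by name: the statement is the Claim_ definition above) =====
theorem get_row_blocks_spec : Claim_equal_get_row_blocks := by
  intro hist ps pe _hd
  unfold Spec_get_row_blocks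
  cases hist with
  | nil => simp [get_row_blocks, get_row_blocks_alt, grbA_loop]
  | cons x xs =>
    show grbA_loop (x :: xs) (x :: xs) ps pe [] false true [] 0 = _
    rw [grbA_notstarted (x :: xs).length (x :: xs) (x :: xs) ps pe [] [] 0 le_rfl (by simp)]
    simp [get_row_blocks_alt, pvMaxOf]
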